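-- pv_equiv track=rewrite | github.com/ifer212/astrothesispy | utiles/Madcuba_plotter.py | group_by_difference
-- ===== SOURCE A (Python) =====
-- import itertools
--
-- class Grouper:
--     """simple class to perform comparison when called, storing last element given"""
--     def __init__(self, diff):
--         self.last = None
--         self.diff = diff
--     def predicate(self, item):
--         if self.last is None:
--             return True
--         return abs(self.last - item) < self.diff
--     def __call__(self, item):
--         """called with each item by takewhile"""
--         result = self.predicate(item)
--         self.last = item
--         return result
--
-- def group_by_difference(items, diff=50):
--     results = []
--     start = 0
--     remaining_items = items
--     while remaining_items:
--         g = Grouper(diff)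
--         group = [*itertools.takewhile(g, remaining_items)]
--         results.append(group)
--         start += len(group)
--         remaining_items = items[start:]
--
--     results_index = []
--     for s,subgroup in enumerate(results):
--         results_index.append([])
--         for element in subgroup:
--             indices = [i for i, x in enumerate(items) if x == element]
--             results_index[s].append(indices[0])
--     return results, results_index
-- ===== SOURCE B (Python) =====
-- def group_by_difference(items, diff=50):
--     groups = []
--     cur = []
--     prev = None
--     for x in items:
--         if cur and abs(prev - x) >= diff:
--             groups.append(cur)
--             cur = []
--         cur.append(x)
--         prev = x
--     if cur:
--         groups.append(cur)
--     first = {}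
--     for i, x in enumerate(items):
--         if x not in first:
--             first[x] = i
--     return groups, [[first[x] for x in g] for g in groups]
-- ===== Notes on version B (the rewrite author's own statement) =====
-- stated objective: faster
-- what changed: B builds the runs in one linear pass over the list instead of restarting a takewhile scan from each group boundary, and replaces the per-element whole-list index search by a value-to-first-index dict built once.
import Mathlib
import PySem

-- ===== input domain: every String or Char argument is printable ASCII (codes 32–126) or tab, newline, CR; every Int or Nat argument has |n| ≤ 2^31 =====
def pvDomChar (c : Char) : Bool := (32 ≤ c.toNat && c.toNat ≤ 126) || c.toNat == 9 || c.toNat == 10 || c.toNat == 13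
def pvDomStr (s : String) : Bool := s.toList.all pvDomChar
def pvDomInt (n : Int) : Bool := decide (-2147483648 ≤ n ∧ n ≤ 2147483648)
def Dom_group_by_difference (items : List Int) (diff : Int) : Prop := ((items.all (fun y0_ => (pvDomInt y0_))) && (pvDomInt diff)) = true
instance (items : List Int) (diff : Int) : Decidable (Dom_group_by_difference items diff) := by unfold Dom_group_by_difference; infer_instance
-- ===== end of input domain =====

-- B replaces A's quadratic restart-the-scan grouping and per-element index search by one
-- linear pass for the runs and a first-occurrence dict built once (objective: faster).


-- ===== PORT A =====
-- itertools.takewhile with the stateful Grouper: `last = none` initially, each call stores the item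
def grouperTake (diff : Int) (last : Option Int) : List Int → List Int
  | [] => []
  | x :: xs =>
    if (match last with
        | none => true                       -- predicate: last is None → True
        | some l => decide (|l - x| < diff)) -- abs(self.last - item) < self.diff
    then x :: grouperTake diff (some x) xs
    else []

-- the while loop: remaining_items = items[start:]; dropping the group's length from the
-- current remainder IS items[start + len(group):] since the group is a prefix of it
def gbdLoop (diff : Int) (rem : List Int) : List (List Int) :=
  match rem with
  | [] => []
  | x :: xs =>
    let g := grouperTake diff none (x :: xs)
    g :: gbdLoop diff ((x :: xs).drop g.length)
termination_by rem.length
decreasing_by simp [grouperTake]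

def group_by_difference (items : List Int) (diff : Int) : List (List Int) × List (List Int) :=
  let results := gbdLoop diff items
  -- indices = [i for i, x in enumerate(items) if x == element]; indices[0]
  -- indices[0] cannot raise: every element comes from items, so the filter is nonempty;
  -- the .getD 0 default is therefore never used
  let results_index := results.map (fun sub => sub.map (fun e =>
    ((((PySem.List.enumerate items).filter (fun p => p.2 == e)).map (·.1)).head?).getD 0))
  (results, results_index)

-- ===== PORT B =====
-- one step of B's single for-loop; prev is `some` whenever cur is nonempty, and the
-- guarded prev.getD 0 mirrors Python's short-circuit `cur and abs(prev - x) >= diff`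
def bStep (diff : Int) (st : List (List Int) × List Int × Option Int) (x : Int) :
    List (List Int) × List Int × Option Int :=
  let (groups, cur, prev) := st
  let (groups, cur) :=
    if !cur.isEmpty && decide (diff ≤ |prev.getD 0 - x|)
    then (groups ++ [cur], ([] : List Int))
    else (groups, cur)
  (groups, cur ++ [x], some x)

-- first = {}; for i, x in enumerate(items): if x not in first: first[x] = i
def firstIdxDict (items : List Int) : PySem.Dict Int Int :=
  (PySem.List.enumerate items).foldl
    (fun d p => if (d.get? p.2).isNone then d.insert p.2 p.1 else d) PySem.Dict.empty

def group_by_difference_alt (items : List Int) (diff : Int) : List (List Int) × List (List Int) :=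
  let st := items.foldl (bStep diff) ([], [], none)
  let groups := if st.2.1.isEmpty then st.1 else st.1 ++ [st.2.1]
  let first := firstIdxDict items
  -- first[x]: x is in items so the key is present; the .getD 0 default is never used
  (groups, groups.map (fun g => g.map (fun x => (first.get? x).getD 0)))

-- ===== PRECONDITION & SPEC =====
def Spec_group_by_difference (items : List Int) (diff : Int) (out : List (List Int) × List (List Int)) : Prop := out = group_by_difference_alt items diff
instance (items : List Int) (diff : Int) (out : List (List Int) × List (List Int)) : Decidable (Spec_group_by_difference items diff out) := by unfold Spec_group_by_difference; infer_instance

-- ===== CLAIM (what is proved, stated in full; the proofs are below) =====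
def Claim_equal_group_by_difference : Prop := ∀ (items : List Int) (diff : Int), Dom_group_by_difference items diff → Spec_group_by_difference items diff (group_by_difference items diff)

-- ===== LEMMAS AND PROOFS =====

-- finalize B's fold state: flush the pending run
def bFin (st : List (List Int) × List Int × Option Int) : List (List Int) :=
  if st.2.1.isEmpty then st.1 else st.1 ++ [st.2.1]

theorem gbdLoop_nil (diff : Int) : gbdLoop diff [] = [] := by
  rw [gbdLoop.eq_def]

theorem gbdLoop_cons (diff x : Int) (xs : List Int) :
    gbdLoop diff (x :: xs) =
      (x :: grouperTake diff (some x) xs) ::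
        gbdLoop diff (xs.drop (grouperTake diff (some x) xs).length) := by
  rw [gbdLoop.eq_def]
  simp [grouperTake]

-- B's loop, run from a nonempty pending run c whose last element is p, produces
-- exactly A's decomposition: c extended by the takewhile prefix, then A's loop on the rest.
theorem bFold_inv (diff : Int) : ∀ (xs : List Int) (groups : List (List Int)) (c : List Int) (p : Int),
    c ≠ [] →
    bFin (xs.foldl (bStep diff) (groups, c, some p)) =
      groups ++ (c ++ grouperTake diff (some p) xs) ::
        gbdLoop diff (xs.drop (grouperTake diff (some p) xs).length) := by
  intro xs
  induction xs with
  | nil =>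
    intro groups c p hc
    simp [bFin, grouperTake, gbdLoop_nil, hc]
  | cons x xs ih =>
    intro groups c p hc
    by_cases h : |p - x| < diff
    · have hcond : (!c.isEmpty && decide (diff ≤ |(some p).getD 0 - x|)) = false := by
        simp [decide_eq_false_iff_not]; omega
      simp only [List.foldl_cons, bStep, hcond, Bool.false_eq_true, ite_false]
      rw [ih groups (c ++ [x]) x (by simp)]
      simp [grouperTake, h]
    · have hcond : (!c.isEmpty && decide (diff ≤ |(some p).getD 0 - x|)) = true := by
        simp [hc]; omega
      simp only [List.foldl_cons, bStep, hcond, reduceIte, List.nil_append]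
      rw [ih (groups ++ [c]) [x] x (by simp)]
      simp [grouperTake, h, gbdLoop_cons]

theorem groups_eq (items : List Int) (diff : Int) :
    bFin (items.foldl (bStep diff) ([], [], none)) = gbdLoop diff items := by
  cases items with
  | nil => simp [bFin, gbdLoop_nil]
  | cons x xs =>
    have hstep : bStep diff ([], [], none) x = ([], [x], some x) := by
      simp [bStep]
    simp only [List.foldl_cons, hstep]
    rw [bFold_inv diff xs [] [x] x (by simp)]
    simp [gbdLoop_cons]

-- the first-occurrence dict looks up exactly what A's filter-and-take-head computes
theorem firstFold_get? (e : Int) : ∀ (ps : List (Int × Int)) (d : PySem.Dict Int Int),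
    (ps.foldl (fun d p => if (d.get? p.2).isNone then d.insert p.2 p.1 else d) d).get? e =
      match d.get? e with
      | some v => some v
      | none => ((ps.filter (fun p => p.2 == e)).map (·.1)).head? := by
  intro ps
  induction ps with
  | nil => intro d; cases hd : d.get? e <;> simp [hd]
  | cons p ps ih =>
    intro d
    simp only [List.foldl_cons]
    by_cases hpe : p.2 = e
    · subst hpe
      cases hd : d.get? p.2 with
      | some v => simp only [hd, Option.isNone_some, Bool.false_eq_true, reduceIte, ih]
      | none =>
        rw [if_pos (by simp only [Option.isNone_none]), ih, PySem.Dict.get?_insert_self]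
        simp
    · cases hd : d.get? p.2 with
      | some v =>
        simp only [Option.isNone_some, Bool.false_eq_true, reduceIte, ih]
        cases hde : d.get? e <;> simp [hpe]
      | none =>
        rw [if_pos (by simp only [Option.isNone_none]), ih, PySem.Dict.get?_insert_of_ne _ _ (fun h => hpe h.symm)]
        cases hde : d.get? e <;> simp [hpe]

theorem firstIdx_eq (items : List Int) (e : Int) :
    ((firstIdxDict items).get? e).getD 0 =
      ((((PySem.List.enumerate items).filter (fun p => p.2 == e)).map (·.1)).head?).getD 0 := by
  unfold firstIdxDict
  rw [firstFold_get? e _ PySem.Dict.empty]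
  simp [PySem.Dict.get?_empty]

-- ===== VERDICT (by name: the statement is the Claim_ definition above) =====
theorem group_by_difference_spec : Claim_equal_group_by_difference := by
  intro items diff _
  unfold Spec_group_by_difference
  simp only [group_by_difference, group_by_difference_alt]
  have hg := groups_eq items diff
  unfold bFin at hg
  rw [hg]
  refine congrArg _ ?_
  refine List.map_congr_left (fun g _ => ?_)
  refine List.map_congr_left (fun x _ => ?_)
  exact (firstIdx_eq items x).symm
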